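-- pv_equiv track=rewrite | github.com/cspc777/VR | data_loader.py | get_clips_by_stride2
-- ===== SOURCE A (Python) =====
-- def get_clips_by_stride2(stride, frames_list, sequence_size):
--     """ For data augmenting purposes.
--     Parameters
--     ----------
--     stride : int
--         The desired distance between two consecutive frames
--     frames_list : list
--         A list of image path
--     sequence_size: int
--         The size of sequence
--     Returns
--     -------
--     list
--         A list of clips , 10 frames each  [0, 1, 2, 3, 4, 5]
--                                           [1, 2, 3, 4, 5, 6]
--     """
--     clips = []
--     sz = len(frames_list)
--     clip = []
--     cnt = 0
--     for start in range(0, sz-sequence_size):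
--         for i in range(start, start+sequence_size):
--             clip.append(frames_list[i])
--         clips.append(clip)
--         clip = []
--     return clips
-- ===== SOURCE B (Python) =====
-- def get_clips_by_stride2(stride, frames_list, sequence_size):
--     n = max(0, len(frames_list) - sequence_size)
--     k = max(0, sequence_size)
--     clips = []
--     rest = frames_list
--     for _ in range(n):
--         clips.append(rest[:k])
--         rest = rest[1:]
--     return clips
-- ===== Notes on version B (the rewrite author's own statement) =====
-- stated objective: simpler
-- what changed: Replaces A's nested index loops (start positions, then per-index element appends into a reset clip accumulator) by a single pass that keeps a shrinking suffix of the list and emits its length-k prefix slice as each clip.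
import Mathlib
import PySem

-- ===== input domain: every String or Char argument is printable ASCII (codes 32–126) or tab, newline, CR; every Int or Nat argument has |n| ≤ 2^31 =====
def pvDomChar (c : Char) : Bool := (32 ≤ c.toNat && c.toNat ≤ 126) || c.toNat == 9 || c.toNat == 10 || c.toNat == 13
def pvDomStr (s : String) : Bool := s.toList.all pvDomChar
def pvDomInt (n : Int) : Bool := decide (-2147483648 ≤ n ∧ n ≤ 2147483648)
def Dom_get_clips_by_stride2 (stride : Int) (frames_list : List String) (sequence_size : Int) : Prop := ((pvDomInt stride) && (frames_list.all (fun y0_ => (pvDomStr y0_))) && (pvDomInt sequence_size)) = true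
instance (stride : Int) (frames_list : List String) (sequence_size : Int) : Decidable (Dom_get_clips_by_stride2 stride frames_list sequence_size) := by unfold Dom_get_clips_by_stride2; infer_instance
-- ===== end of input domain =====

-- B replaces A's nested index loops by one pass that keeps a shrinking suffix of the
-- list and takes its length-k prefix as each clip (objective: simpler, same cost class).

-- ===== PORT A =====
-- literal port: nested for-loops over ranges, clip accumulator reset each round;
-- frames_list[i] → pyGetD (the loop bounds keep i in range, so the default is never used)
def get_clips_by_stride2 (stride : Int) (frames_list : List String) (sequence_size : Int) : List (List String) :=
  let sz : Int := frames_list.length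
  ((PySem.List.pyRange 0 (sz - sequence_size) 1).foldl
    (fun (st : List (List String) × List String) start =>
      let clip := (PySem.List.pyRange start (start + sequence_size) 1).foldl
        (fun c i => c ++ [PySem.List.pyGetD frames_list i ""]) st.2
      (st.1 ++ [clip], []))
    ([], [])).1

-- ===== PORT B =====
-- rest[:k] → slice rest none (some k); rest[1:] → slice rest (some 1) none
def pvAltGo (n : Nat) (rest : List String) (k : Int) : List (List String) :=
  match n with
  | 0 => []
  | n + 1 => PySem.List.slice rest none (some k) :: pvAltGo n (PySem.List.slice rest (some 1) none) k

def get_clips_by_stride2_alt (stride : Int) (frames_list : List String) (sequence_size : Int) : List (List String) :=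
  let n : Int := max 0 ((frames_list.length : Int) - sequence_size)
  let k : Int := max 0 sequence_size
  pvAltGo n.toNat frames_list k

-- ===== PRECONDITION & SPEC =====
def Spec_get_clips_by_stride2 (stride : Int) (frames_list : List String) (sequence_size : Int) (out : List (List String)) : Prop := out = get_clips_by_stride2_alt stride frames_list sequence_size
instance (stride : Int) (frames_list : List String) (sequence_size : Int) (out : List (List String)) : Decidable (Spec_get_clips_by_stride2 stride frames_list sequence_size out) := by unfold Spec_get_clips_by_stride2; infer_instance

-- ===== CLAIM (what is proved, stated in full; the proofs are below) =====
def Claim_equal_get_clips_by_stride2 : Prop := ∀ (stride : Int) (frames_list : List String) (sequence_size : Int), Dom_get_clips_by_stride2 stride frames_list sequence_size → Spec_get_clips_by_stride2 stride frames_list sequence_size (get_clips_by_stride2 stride frames_list sequence_size)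

-- ===== LEMMAS AND PROOFS =====

-- B computes the s-th clip as the k-prefix of the s-th suffix
lemma pvAltGo_eq (n : Nat) (k : Int) (hk : 0 ≤ k) : ∀ (rest : List String),
    pvAltGo n rest k = (List.range n).map (fun s => (rest.drop s).take k.toNat) := by
  induction n with
  | zero => intro rest; simp [pvAltGo]
  | succ n ih =>
    intro rest
    rw [pvAltGo, ih, List.range_succ_eq_map]
    simp [PySem.List.slice_to _ hk, PySem.List.slice_from rest (by norm_num : (0:Int) ≤ 1),
      List.map_map, Function.comp]

-- A's outer loop: the clip accumulator is empty at each round and the result is a map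
lemma foldA_eq (l : List String) (seq : Int) : ∀ (xs : List Int) (acc : List (List String)),
    (xs.foldl
      (fun (st : List (List String) × List String) start =>
        (st.1 ++ [(PySem.List.pyRange start (start + seq) 1).foldl
          (fun c i => c ++ [PySem.List.pyGetD l i ""]) st.2], []))
      (acc, [])).1
    = acc ++ xs.map (fun start =>
        (PySem.List.pyRange start (start + seq) 1).foldl
          (fun c i => c ++ [PySem.List.pyGetD l i ""]) []) := by
  intro xs
  induction xs with
  | nil => intro acc; simp
  | cons x xs ih =>
    intro acc
    rw [List.foldl_cons, ih]
    simp

-- one in-range window of indexed reads is a drop-take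
lemma window_eq (l : List String) (s K : Nat) (h : s + K ≤ l.length) :
    (List.range K).map (fun (j : Nat) => PySem.List.pyGetD l ((s : Int) + (j : Int)) "")
      = (l.drop s).take K := by
  apply List.ext_getElem
  · simp; omega
  · intro j hj hj'
    have hjK : j < K := by simpa using hj
    have h1 : (0:Int) ≤ (s : Int) + (j : Int) := by positivity
    have h2 : (s : Int) + (j : Int) < l.length := by exact_mod_cast by omega
    have ht : ((s : Int) + (j : Int)).toNat = s + j := by omega
    simp only [List.getElem_map, List.getElem_range]
    rw [PySem.List.pyGetD_eq_getElem l "" h1 h2]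
    simp [List.getElem_take, List.getElem_drop, ht]

-- ===== VERDICT (by name: the statement is the Claim_ definition above) =====
theorem get_clips_by_stride2_spec : Claim_equal_get_clips_by_stride2 := by
  intro stride l seq _
  unfold Spec_get_clips_by_stride2 get_clips_by_stride2 get_clips_by_stride2_alt
  rw [foldA_eq, pvAltGo_eq _ _ (le_max_left 0 seq)]
  have hn : (max 0 ((l.length : Int) - seq)).toNat = ((l.length : Int) - seq).toNat := by omega
  have hkN : (max 0 seq).toNat = seq.toNat := by omega
  rw [hn, hkN, PySem.List.pyRange_one, List.map_map, List.nil_append]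
  simp only [sub_zero]
  apply List.map_congr_left
  intro s hs
  simp only [Function.comp, zero_add]
  rw [PySem.List.foldl_append_singleton_eq_map, PySem.List.pyRange_one]
  have hK : ((s : Int) + seq - (s : Int)).toNat = seq.toNat := by omega
  rw [hK, List.map_map]
  by_cases hpos : 0 < seq
  · have hs' : (s : Int) < (l.length : Int) - seq := by
      have := List.mem_range.mp hs; omega
    rw [← window_eq l s seq.toNat (by omega)]
    rfl
  · have h0 : seq.toNat = 0 := by omega
    simp [h0]
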